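-- pv_equiv track=rewrite | github.com/RasJojo/jojomusic | services/core_api/app/metadata.py | choose_lastfm_image
-- ===== SOURCE A (Python) =====
-- def choose_lastfm_image(images: list[dict] | None) -> str | None:
--     if not images:
--         return None
--
--     for preferred in ("mega", "extralarge", "large", "medium", "small"):
--         for image in images:
--             if image.get("size") == preferred and image.get("#text"):
--                 url = image["#text"]
--                 if not _is_placeholder_image(url):
--                     return url
--
--     for image in images:
--         if image.get("#text"):
--             url = image["#text"]
--             if not _is_placeholder_image(url):
--                 return url
--     return None
--
-- def _is_placeholder_image(url: str | None) -> bool: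
--     if not url:
--         return True
--     return "2a96cbd8b46e442fc41c2b86b821562f" in url
-- ===== SOURCE B (Python) =====
-- _PREFERRED_SIZES = ("mega", "extralarge", "large", "medium", "small")
-- _PLACEHOLDER_HASH = "2a96cbd8b46e442fc41c2b86b821562f"
--
--
-- def choose_lastfm_image(images):
--     # One pass: index the first usable url per size, remember the first usable url overall.
--     by_size = {}
--     fallback = None
--     for image in images or ():
--         url = image.get("#text")
--         if not url or _PLACEHOLDER_HASH in url:
--             continue
--         if fallback is None:
--             fallback = url
--         size = image.get("size")
--         if size not in by_size:
--             by_size[size] = url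
--     for preferred in _PREFERRED_SIZES:
--         if preferred in by_size:
--             return by_size[preferred]
--     return fallback
-- ===== Notes on version B (the rewrite author's own statement) =====
-- stated objective: alternative
-- what changed: Replaces the preference-by-images nested scan (plus a second fallback scan) with a single pass that builds a size->first-usable-url dict while recording the first usable url overall, then one lookup per preferred size.
import Mathlib
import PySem

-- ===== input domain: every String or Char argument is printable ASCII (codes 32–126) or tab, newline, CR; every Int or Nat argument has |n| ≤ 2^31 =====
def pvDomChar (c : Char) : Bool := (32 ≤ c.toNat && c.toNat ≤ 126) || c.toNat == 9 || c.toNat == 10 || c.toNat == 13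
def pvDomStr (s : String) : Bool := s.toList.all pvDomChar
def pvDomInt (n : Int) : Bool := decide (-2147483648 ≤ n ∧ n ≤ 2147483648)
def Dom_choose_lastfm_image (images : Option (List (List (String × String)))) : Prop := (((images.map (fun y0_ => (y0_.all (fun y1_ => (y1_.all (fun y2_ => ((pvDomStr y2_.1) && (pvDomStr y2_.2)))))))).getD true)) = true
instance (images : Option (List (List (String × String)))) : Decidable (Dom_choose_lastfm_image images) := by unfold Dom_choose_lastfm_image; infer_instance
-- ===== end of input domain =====

-- B replaces A's 5 preference passes + fallback pass over the images with one pass that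
-- indexes the first usable url per size and records the first usable url overall (alternative).

def pvPlaceholder : String := "2a96cbd8b46e442fc41c2b86b821562f"

def pvSizes : List String := ["mega", "extralarge", "large", "medium", "small"]

-- Python truthiness of a string
def pvTruthy (s : String) : Bool := !s.toList.isEmpty

-- ===== PORT A =====
-- _is_placeholder_image(url) for url : String (A only calls it on a present value)
def pv_is_placeholder (url : String) : Bool :=
  if !pvTruthy url then true else PySem.Str.isIn pvPlaceholder url

def choose_lastfm_image (images : Option (List (List (String × String)))) : Option String :=
  match images with
  | none => none
  | some imgs =>
    if imgs.isEmpty then none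
    else
      match pvSizes.findSome? (fun preferred =>
          imgs.findSome? (fun image =>
            match (PySem.Dict.mk image).get? "#text" with
            | some url =>
              if ((PySem.Dict.mk image).get? "size" == some preferred) && pvTruthy url then
                if !pv_is_placeholder url then some url else none
              else none
            | none => none)) with
      | some u => some u
      | none =>
        imgs.findSome? (fun image =>
          match (PySem.Dict.mk image).get? "#text" with
          | some url =>
            if pvTruthy url then
              if !pv_is_placeholder url then some url else none
            else none
          | none => none)

-- ===== PORT B =====
-- the body of B's loop: skip unusable urls ('continue'), else update fallback and the index
def pvGoodUrl (image : List (String × String)) : Option String :=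
  match (PySem.Dict.mk image).get? "#text" with
  | some url => if !pvTruthy url || PySem.Str.isIn pvPlaceholder url then none else some url
  | none => none

def pvStepB (st : PySem.Dict (Option String) String × Option String)
    (image : List (String × String)) : PySem.Dict (Option String) String × Option String :=
  match pvGoodUrl image with
  | none => st
  | some url =>
    let fb := match st.2 with | none => some url | some _ => st.2
    let key := (PySem.Dict.mk image).get? "size"
    let d := if st.1.contains key then st.1 else st.1.insert key url
    (d, fb)

def choose_lastfm_image_alt (images : Option (List (List (String × String)))) : Option String :=
  let st := (images.getD []).foldl pvStepB (PySem.Dict.empty, none)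
  match pvSizes.findSome? (fun p => st.1.get? (some p)) with
  | some u => some u
  | none => st.2

-- ===== PRECONDITION & SPEC =====
def Spec_choose_lastfm_image (images : Option (List (List (String × String)))) (out : Option String) : Prop := out = choose_lastfm_image_alt images
instance (images : Option (List (List (String × String)))) (out : Option String) : Decidable (Spec_choose_lastfm_image images out) := by unfold Spec_choose_lastfm_image; infer_instance

-- ===== CLAIM (what is proved, stated in full; the proofs are below) =====
def Claim_equal_choose_lastfm_image : Prop := ∀ (images : Option (List (List (String × String)))), Dom_choose_lastfm_image images → Spec_choose_lastfm_image images (choose_lastfm_image images)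

-- ===== LEMMAS AND PROOFS =====

-- A's inner test for a fixed preferred size, as B's index sees it (key = get? "size")
def pvMatch (k : Option String) (image : List (String × String)) : Option String :=
  match pvGoodUrl image with
  | some url => if (PySem.Dict.mk image).get? "size" == k then some url else none
  | none => none

theorem pv_fold_fst (l : List (List (String × String)))
    (d : PySem.Dict (Option String) String) (fb : Option String) (k : Option String) :
    ((l.foldl pvStepB (d, fb)).1).get? k = (d.get? k).or (l.findSome? (pvMatch k)) := by
  induction l generalizing d fb with
  | nil => simp
  | cons image l ih =>
    rw [List.foldl_cons, List.findSome?_cons]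
    have hstep : pvStepB (d, fb) image = ((pvStepB (d, fb) image).1, (pvStepB (d, fb) image).2) := rfl
    rw [hstep, ih]
    unfold pvStepB pvMatch
    cases hg : pvGoodUrl image with
    | none => simp
    | some url =>
      simp only
      by_cases hk : (PySem.Dict.mk image).get? "size" = k
      · subst hk
        simp only [beq_self_eq_true, if_pos]
        by_cases hc : d.contains ((PySem.Dict.mk image).get? "size") = true
        · rw [if_pos hc]
          rw [PySem.Dict.contains_eq_isSome_get?] at hc
          cases hd : d.get? ((PySem.Dict.mk image).get? "size") with
          | none => rw [hd] at hc; simp at hc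
          | some v => simp [Option.or]
        · rw [if_neg hc]
          rw [PySem.Dict.contains_eq_isSome_get?] at hc
          cases hd : d.get? ((PySem.Dict.mk image).get? "size") with
          | none => simp [PySem.Dict.get?_insert_self, Option.or]
          | some v => rw [hd] at hc; simp at hc
      · have hbeq : ((PySem.Dict.mk image).get? "size" == k) = false := by
          simp [beq_eq_false_iff_ne, hk]
        rw [hbeq]
        simp only [if_false, Bool.false_eq_true]
        by_cases hc : d.contains ((PySem.Dict.mk image).get? "size") = true
        · rw [if_pos hc]
        · rw [if_neg hc, PySem.Dict.get?_insert, if_neg (fun h => hk h.symm)]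

theorem pv_fold_snd (l : List (List (String × String)))
    (d : PySem.Dict (Option String) String) (fb : Option String) :
    (l.foldl pvStepB (d, fb)).2 = fb.or (l.findSome? pvGoodUrl) := by
  induction l generalizing d fb with
  | nil => simp
  | cons image l ih =>
    rw [List.foldl_cons, List.findSome?_cons]
    have hstep : pvStepB (d, fb) image = ((pvStepB (d, fb) image).1, (pvStepB (d, fb) image).2) := rfl
    rw [hstep, ih]
    unfold pvStepB
    cases hg : pvGoodUrl image with
    | none => simp
    | some url => cases fb <;> simp [Option.or]

-- A's per-image test equals B's index test, pointwise
theorem pv_inner_eq (p : String) (image : List (String × String)) :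
    (match (PySem.Dict.mk image).get? "#text" with
      | some url =>
        if ((PySem.Dict.mk image).get? "size" == some p) && pvTruthy url then
          if !pv_is_placeholder url then some url else none
        else none
      | none => none) = pvMatch (some p) image := by
  unfold pvMatch pvGoodUrl pv_is_placeholder
  cases hget : (PySem.Dict.mk image).get? "#text" with
  | none => rfl
  | some url =>
    cases htr : pvTruthy url <;>
      cases hin : PySem.Chars.isIn pvPlaceholder.toList url.toList <;>
        cases hsz : ((PySem.Dict.mk image).get? "size" == some p) <;>
          simp_all

-- A's fallback per-image test equals pvGoodUrl, pointwise
theorem pv_fallback_eq (image : List (String × String)) :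
    (match (PySem.Dict.mk image).get? "#text" with
      | some url =>
        if pvTruthy url then
          if !pv_is_placeholder url then some url else none
        else none
      | none => none) = pvGoodUrl image := by
  unfold pvGoodUrl pv_is_placeholder
  cases hget : (PySem.Dict.mk image).get? "#text" with
  | none => rfl
  | some url =>
    cases htr : pvTruthy url <;>
      cases hin : PySem.Chars.isIn pvPlaceholder.toList url.toList <;>
        simp [htr, hin]

-- ===== VERDICT (by name: the statement is the Claim_ definition above) =====
theorem choose_lastfm_image_spec : Claim_equal_choose_lastfm_image := by
  intro images _
  unfold Spec_choose_lastfm_image choose_lastfm_image choose_lastfm_image_alt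
  cases images with
  | none => rfl
  | some imgs =>
    cases imgs with
    | nil => rfl
    | cons i0 rest =>
      simp only [List.isEmpty_cons, Option.getD_some, if_false, Bool.false_eq_true]
      rw [pv_fold_snd (i0 :: rest) PySem.Dict.empty none]
      have hidx : (fun p => ((((i0 :: rest).foldl pvStepB (PySem.Dict.empty, none)).1).get? (some p)))
          = fun p => (i0 :: rest).findSome? (pvMatch (some p)) := by
        funext p
        rw [pv_fold_fst (i0 :: rest) PySem.Dict.empty none (some p)]
        simp [PySem.Dict.get?_empty, Option.or]
      rw [hidx]
      have hA : (fun preferred => (i0 :: rest).findSome? (fun image =>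
            match (PySem.Dict.mk image).get? "#text" with
            | some url =>
              if ((PySem.Dict.mk image).get? "size" == some preferred) && pvTruthy url then
                if !pv_is_placeholder url then some url else none
              else none
            | none => none))
          = fun preferred => (i0 :: rest).findSome? (pvMatch (some preferred)) := by
        funext preferred
        congr 1
        funext image
        exact pv_inner_eq preferred image
      rw [hA]
      have hF : (fun image =>
            match (PySem.Dict.mk image).get? "#text" with
            | some url =>
              if pvTruthy url then
                if !pv_is_placeholder url then some url else none
              else none
            | none => none) = pvGoodUrl := by
        funext image; exact pv_fallback_eq image
      rw [hF]
      simp [Option.or]
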